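-- pv_equiv track=rewrite | github.com/Elvirience/BigData | lesson4/homework4.py | num6_2
-- ===== SOURCE A (Python) =====
-- from itertools import count, cycle
--
-- def num6_2(my_list, steps, counter=0):
--     for i in cycle(my_list):
--         """
--         steps*len(my_list) - число шагов в одном обороте "cycle()"
--         """
--         if counter >= steps*len(my_list):
--             break
--         yield i
--         counter += 1
-- ===== SOURCE B (Python) =====
-- def num6_2(my_list, steps, counter=0):
--     n = len(my_list)
--     total = steps * n - counter
--     if n == 0 or total <= 0:
--         return
--     q, r = divmod(total, n)
--     yield from my_list * q + my_list[:r]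
-- ===== Notes on version B (the rewrite author's own statement) =====
-- stated objective: simpler
-- what changed: Replaced the infinite itertools.cycle iterator with an incrementing counter-break by a closed-form bulk construction: divmod gives the number of whole rounds q and the remainder r, and the output is the list my_list*q plus the slice my_list[:r], yielded at once.
import Mathlib
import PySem

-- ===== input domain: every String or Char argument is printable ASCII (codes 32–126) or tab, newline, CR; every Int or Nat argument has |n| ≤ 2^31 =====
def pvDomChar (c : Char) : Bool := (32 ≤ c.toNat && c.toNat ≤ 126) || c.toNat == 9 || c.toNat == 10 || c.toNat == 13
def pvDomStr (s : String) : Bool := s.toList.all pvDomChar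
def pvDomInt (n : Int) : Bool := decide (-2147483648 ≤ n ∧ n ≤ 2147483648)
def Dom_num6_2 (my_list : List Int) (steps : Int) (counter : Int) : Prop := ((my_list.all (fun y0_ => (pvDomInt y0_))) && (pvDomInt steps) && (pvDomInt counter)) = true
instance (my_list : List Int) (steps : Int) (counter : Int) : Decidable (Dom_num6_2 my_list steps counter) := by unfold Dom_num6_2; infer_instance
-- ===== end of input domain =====

-- B replaces the cycle()+counter-break generator by a closed-form construction:
-- divmod gives whole rounds q and remainder r, and the output is my_list*q ++ my_list[:r].

-- ===== PORT A =====
-- the 'for i in cycle(my_list)' loop for a nonempty list h::t: cur is the rest of the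
-- current cycle pass; when it runs out the cycle restarts at h.  Each yield increments
-- counter, so (bound - counter).toNat bounds the remaining iterations.
def num6_2_go (h : Int) (t : List Int) (bound : Int) (counter : Int) (cur : List Int) : List Int :=
  match cur with
  | [] => if counter ≥ bound then [] else h :: num6_2_go h t bound (counter + 1) t
  | i :: rest => if counter ≥ bound then [] else i :: num6_2_go h t bound (counter + 1) rest
termination_by (bound - counter).toNat
decreasing_by all_goals omega

def num6_2 (my_list : List Int) (steps : Int) (counter : Int) : List Int :=
  match my_list with
  | [] => []  -- cycle([]) yields nothing: the for-loop body never runs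
  | h :: t => num6_2_go h t (steps * (my_list.length : Int)) counter (h :: t)

-- ===== PORT B =====
def num6_2_alt (my_list : List Int) (steps : Int) (counter : Int) : List Int :=
  let n : Int := my_list.length
  let total := steps * n - counter
  if my_list.length = 0 ∨ total ≤ 0 then []
  else
    -- q, r = divmod(total, n)
    let q := PySem.Int.floordiv total n
    let r := PySem.Int.mod total n
    -- my_list * q  ++  my_list[:r]  (q, r ≥ 0 here, so replication count and slice are toNat/take)
    (List.replicate q.toNat my_list).flatten ++ my_list.take r.toNat

-- ===== PRECONDITION & SPEC =====
def Spec_num6_2 (my_list : List Int) (steps : Int) (counter : Int) (out : List Int) : Prop := out = num6_2_alt my_list steps counter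
instance (my_list : List Int) (steps : Int) (counter : Int) (out : List Int) : Decidable (Spec_num6_2 my_list steps counter out) := by unfold Spec_num6_2; infer_instance

-- ===== CLAIM =====
def Claim_equal_num6_2 : Prop := ∀ (my_list : List Int) (steps : Int) (counter : Int), Dom_num6_2 my_list steps counter → Spec_num6_2 my_list steps counter (num6_2 my_list steps counter)

-- ===== LEMMAS AND PROOFS =====

-- reference function: take n elements of the cycle of h::t, starting from suffix cur
def cycTake (h : Int) (t : List Int) : List Int → Nat → List Int
  | _, 0 => []
  | [], n + 1 => h :: cycTake h t t n
  | i :: rest, n + 1 => i :: cycTake h t rest n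

theorem cycTake_nil_eq (h : Int) (t : List Int) (n : Nat) :
    cycTake h t [] n = cycTake h t (h :: t) n := by
  cases n <;> simp [cycTake]

theorem num6_2_go_eq (h : Int) (t : List Int) (bound : Int) :
    ∀ (n : Nat) (counter : Int), (bound - counter).toNat = n →
      ∀ cur, num6_2_go h t bound counter cur = cycTake h t cur n := by
  intro n
  induction n with
  | zero =>
    intro counter hc cur
    have hb : counter ≥ bound := by omega
    cases cur <;> simp [num6_2_go, hb, cycTake]
  | succ m ih =>
    intro counter hc cur
    have hb : ¬ counter ≥ bound := by omega
    have hm : (bound - (counter + 1)).toNat = m := by omega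
    cases cur <;> simp [num6_2_go, hb, cycTake, ih _ hm]

theorem cycTake_split (h : Int) (t : List Int) :
    ∀ (cur : List Int) (n : Nat),
      cycTake h t cur n = cur.take n ++ cycTake h t (h :: t) (n - cur.length) := by
  intro cur
  induction cur with
  | nil => intro n; simpa using cycTake_nil_eq h t n
  | cons i rest ih =>
    intro n
    cases n with
    | zero => simp [cycTake]
    | succ m => simp [cycTake, ih m]

theorem cycTake_closed (h : Int) (t : List Int) :
    ∀ n : Nat, cycTake h t (h :: t) n =
      (List.replicate (n / (t.length + 1)) (h :: t)).flatten ++ (h :: t).take (n % (t.length + 1)) := by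
  intro n
  induction n using Nat.strong_induction_on with
  | _ n ih =>
    by_cases hlt : n < t.length + 1
    · rw [cycTake_split]
      have h2 : n / (t.length + 1) = 0 := Nat.div_eq_of_lt hlt
      have h3 : n % (t.length + 1) = n := Nat.mod_eq_of_lt hlt
      have h1 : n - (h :: t).length = 0 := by simp; omega
      rw [h1]
      simp [h2, h3, cycTake]
    · obtain ⟨m, rfl⟩ : ∃ m, n = (t.length + 1) + m := ⟨n - (t.length + 1), by omega⟩
      rw [cycTake_split]
      have hlen : ((t.length + 1) + m) - (h :: t).length = m := by simp
      have htake : (h :: t).take ((t.length + 1) + m) = h :: t :=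
        List.take_of_length_le (by simp only [List.length_cons]; omega)
      have hdiv : ((t.length + 1) + m) / (t.length + 1) = m / (t.length + 1) + 1 := by
        rw [Nat.add_comm]; exact Nat.add_div_right m (by omega)
      have hmod : ((t.length + 1) + m) % (t.length + 1) = m % (t.length + 1) :=
        Nat.add_mod_left _ _
      rw [hlen, htake, hdiv, hmod, ih m (by omega), List.replicate_succ]
      simp

theorem num6_2_eq_alt (my_list : List Int) (steps : Int) (counter : Int) :
    num6_2 my_list steps counter = num6_2_alt my_list steps counter := by
  cases my_list with
  | nil => simp [num6_2, num6_2_alt]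
  | cons h t =>
    simp only [num6_2, num6_2_alt]
    set total : Int := steps * ((h :: t).length : Int) - counter with htot
    rw [num6_2_go_eq h t _ total.toNat counter (by omega) (h :: t)]
    by_cases hle : total ≤ 0
    · have : total.toNat = 0 := by omega
      rw [this]
      simp [cycTake, hle]
    · have hpos : 0 < total := by omega
      have hcast : total = ((total.toNat : Nat) : Int) := by omega
      have hL : ((h :: t).length : Int) = ((t.length + 1 : Nat) : Int) := by simp
      have hq : PySem.Int.floordiv total ((t.length + 1 : Nat) : Int)
          = ((total.toNat / (t.length + 1) : Nat) : Int) := by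
        rw [hcast]; exact PySem.Int.floordiv_natCast _ _
      have hr : PySem.Int.mod total ((t.length + 1 : Nat) : Int)
          = ((total.toNat % (t.length + 1) : Nat) : Int) := by
        rw [hcast]; exact PySem.Int.mod_natCast _ _
      simp only [hle, or_false, List.length_cons]
      rw [if_neg (by omega)]
      rw [cycTake_closed]
      have e1 : (PySem.Int.floordiv total ((t.length + 1 : Nat) : Int)).toNat
          = total.toNat / (t.length + 1) := by rw [hq]; exact Int.toNat_natCast _
      have e2 : (PySem.Int.mod total ((t.length + 1 : Nat) : Int)).toNat
          = total.toNat % (t.length + 1) := by rw [hr]; exact Int.toNat_natCast _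
      rw [← e1, ← e2]

-- ===== VERDICT =====
theorem num6_2_spec : Claim_equal_num6_2 := by
  intro my_list steps counter _
  unfold Spec_num6_2
  exact num6_2_eq_alt my_list steps counter
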